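-- pv_equiv track=rewrite | github.com/gooderno1/LarkSync | apps/backend/src/services/docx_service.py | _group_cells_by_row_token
-- ===== SOURCE A (Python) =====
-- def _group_cells_by_row_token(cells: list[str]) -> list[list[str]]:
--     row_order: list[str] = []
--     rows: dict[str, list[str]] = {}
--     for cell in cells:
--         if not cell.startswith("row") or "col" not in cell:
--             return []
--         try:
--             row_token, col_token = cell[3:].split("col", 1)
--         except ValueError:
--             return []
--         if row_token not in rows:
--             row_order.append(row_token)
--             rows[row_token] = []
--         rows[row_token].append(f"row{row_token}col{col_token}")
--     return [rows[row] for row in row_order]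
-- ===== SOURCE B (Python) =====
-- def _group_cells_by_row_token(cells: list[str]) -> list[list[str]]:
--     keyed = []
--     for cell in cells:
--         i = cell.find("col")
--         if not cell.startswith("row") or i < 0:
--             return []
--         keyed.append((cell[3:i], cell))
--     return [[c for k, c in keyed if k == key]
--             for key in dict.fromkeys(k for k, _ in keyed)]
-- ===== Notes on version B (the rewrite author's own statement) =====
-- stated objective: alternative
-- what changed: A builds the groups in one pass with a dict of growing buckets and re-assembles each cell from its split parts; B first derives a (row-key, cell) pair per cell via str.find (returning [] on the first invalid cell), then emits, for each first-occurrence-ordered distinct key, the filtered list of original cells.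
import Mathlib
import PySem

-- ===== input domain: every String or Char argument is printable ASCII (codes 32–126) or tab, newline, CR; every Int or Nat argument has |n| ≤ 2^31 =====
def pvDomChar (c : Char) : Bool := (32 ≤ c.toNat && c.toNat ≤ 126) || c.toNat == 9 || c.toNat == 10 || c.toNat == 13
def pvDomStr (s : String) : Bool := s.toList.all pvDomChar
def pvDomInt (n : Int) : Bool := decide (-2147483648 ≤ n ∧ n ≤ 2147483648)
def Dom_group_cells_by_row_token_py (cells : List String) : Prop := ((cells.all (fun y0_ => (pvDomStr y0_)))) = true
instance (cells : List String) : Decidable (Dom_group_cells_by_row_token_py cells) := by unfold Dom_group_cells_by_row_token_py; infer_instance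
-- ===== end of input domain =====

-- ===== PORT A =====
-- B groups via a keyed list + per-key filters instead of A's dict of buckets; alternative decomposition, not faster.
-- Both ports work on cell.toList via PySem.Chars (the PySem.Str functions are thin wrappers over these; exact).
-- port of A's loop: state (order, rows), early return [] on an invalid cell or a split that does not give 2 parts
def groupA_go : List String → List (List Char) → PySem.Dict (List Char) (List (List Char)) → List (List String)
  | [], order, rows => order.map (fun r => (rows.getD r []).map String.ofList)
  | cell :: rest, order, rows =>
    if !PySem.Chars.startswith cell.toList ['r','o','w'] || !PySem.Chars.isIn ['c','o','l'] cell.toList then []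
    else
      match PySem.Chars.splitMax? (PySem.Chars.slice cell.toList (some 3) none) ['c','o','l'] 1 with
      | some [rt, ct] =>
        let st := if rows.contains rt then (order, rows) else (order ++ [rt], rows.insert rt [])
        groupA_go rest st.1
          (st.2.modify rt [] (fun l => l ++ [PySem.Chars.join [] [['r','o','w'], rt, ['c','o','l'], ct]]))
      | _ => []

def group_cells_by_row_token_py (cells : List String) : List (List String) :=
  groupA_go cells [] PySem.Dict.empty

-- ===== PORT B =====
-- port of B's first loop: the (key, cell) pairs; none = the early return []
def keyedB : List String → Option (List (List Char × String))
  | [] => some []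
  | cell :: rest =>
    let i := PySem.Chars.find cell.toList ['c','o','l']
    if !PySem.Chars.startswith cell.toList ['r','o','w'] || i < 0 then none
    else (keyedB rest).map (fun ks => (PySem.Chars.slice cell.toList (some 3) (some i), cell) :: ks)

def group_cells_by_row_token_py_alt (cells : List String) : List (List String) :=
  match keyedB cells with
  | none => []
  | some keyed =>
      (PySem.List.dedup (keyed.map Prod.fst)).map
        (fun key => (keyed.filter (fun p => p.1 == key)).map Prod.snd)

-- ===== PRECONDITION & SPEC =====
def Spec_group_cells_by_row_token_py (cells : List String) (out : List (List String)) : Prop := out = group_cells_by_row_token_py_alt cells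
instance (cells : List String) (out : List (List String)) : Decidable (Spec_group_cells_by_row_token_py cells out) := by unfold Spec_group_cells_by_row_token_py; infer_instance

-- ===== CLAIM (what is proved, stated in full; the proofs are below) =====
def Claim_equal_group_cells_by_row_token_py : Prop := ∀ (cells : List String), Dom_group_cells_by_row_token_py cells → Spec_group_cells_by_row_token_py cells (group_cells_by_row_token_py cells)

-- ===== LEMMAS AND PROOFS =====

-- find points at k when the pattern is at k and nowhere earlier
theorem find_eq_of (l sub : List Char) (k : Nat) (h1 : sub <+: l.drop k)
    (h2 : ∀ i < k, ¬ sub <+: l.drop i) : PySem.Chars.find l sub = (k : Int) := by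
  have hinf : sub <:+: l := h1.isInfix.trans (List.drop_suffix k l).isInfix
  have hnn : 0 ≤ PySem.Chars.find l sub := (PySem.Chars.find_nonneg_iff _ _).2 hinf
  obtain ⟨hp, hmin⟩ := PySem.Chars.find_spec hnn
  rcases lt_trichotomy (PySem.Chars.find l sub).toNat k with h | h | h
  · exact absurd hp (h2 _ h)
  · omega
  · exact absurd h1 (hmin k h)

-- "col" cannot overlap the "row" prefix, so it also occurs after it
theorem col_in_drop3 (s : List Char) (h1 : ['r','o','w'] <+: s)
    (h2 : ['c','o','l'] <:+: s) : ['c','o','l'] <:+: s.drop 3 := by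
  have hin : PySem.Chars.isIn ['c','o','l'] s = true := (PySem.Chars.isIn_iff_infix _ _).2 h2
  obtain ⟨j, hj⟩ := (PySem.Chars.exists_prefix_drop_iff_isIn ['c','o','l'] s).2 hin
  obtain ⟨tail, rfl⟩ := h1
  rcases Nat.lt_or_ge j 3 with hj3 | hj3
  · interval_cases j <;> simp_all [List.cons_prefix_cons]
  · have : List.drop j (['r','o','w'] ++ tail) = List.drop (j - 3) (List.drop 3 (['r','o','w'] ++ tail)) := by
      rw [List.drop_drop]; congr 1; omega
    rw [this] at hj
    exact hj.isInfix.trans (List.drop_suffix _ _).isInfix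

theorem go_m0 (sep : List Char) : ∀ (fuel : Nat) (l cur : List Char) (acc : List (List Char)),
    l.length < fuel →
    PySem.Chars.splitOnMax.go sep fuel 0 l cur acc = ((cur.reverse ++ l) :: acc).reverse := by
  intro fuel l cur acc h
  match fuel, l with
  | 0, l => omega
  | fuel+1, [] => simp [PySem.Chars.splitOnMax.go]
  | fuel+1, c :: rest => simp [PySem.Chars.splitOnMax.go]

theorem find_neg_iff (l sub : List Char) :
    PySem.Chars.find l sub < 0 ↔ ¬ sub <:+: l := by
  constructor
  · intro h hinf
    exact absurd ((PySem.Chars.find_nonneg_iff _ _).2 hinf) (by omega)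
  · intro h
    have := PySem.Chars.find_nonneg_iff l sub
    by_contra hlt
    exact h (this.1 (by omega))

theorem go_one (sep : List Char) (hsep : sep ≠ []) :
    ∀ (fuel : Nat) (l cur : List Char) (acc : List (List Char)), l.length < fuel →
    PySem.Chars.splitOnMax.go sep fuel 1 l cur acc =
      if PySem.Chars.find l sep < 0 then acc.reverse ++ [cur.reverse ++ l]
      else acc.reverse ++ [cur.reverse ++ l.take (PySem.Chars.find l sep).toNat,
                           l.drop ((PySem.Chars.find l sep).toNat + sep.length)] := by
  intro fuel
  induction fuel with
  | zero => intro l cur acc h; omega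
  | succ fuel ih =>
    intro l cur acc h
    match l with
    | [] =>
      have hni : ¬ sep <:+: ([] : List Char) := by
        intro hx; exact hsep (List.eq_nil_of_infix_nil hx)
      rw [if_pos ((find_neg_iff _ _).2 hni)]
      simp [PySem.Chars.splitOnMax.go]
    | c :: rest =>
      by_cases hpre : sep.isPrefixOf (c :: rest)
      · have hp : sep <+: c :: rest := List.isPrefixOf_iff_prefix.1 hpre
        have hf : PySem.Chars.find (c :: rest) sep = ((0 : Nat) : Int) :=
          find_eq_of _ _ 0 (by simpa using hp) (by omega)
        have hlen : (List.drop sep.length (c :: rest)).length < fuel := by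
          have : 1 ≤ sep.length := by
            cases sep with | nil => exact absurd rfl hsep | cons a t => simp
          simp only [List.length_drop]; simp at h ⊢; omega
        rw [show PySem.Chars.splitOnMax.go sep (fuel+1) 1 (c :: rest) cur acc
              = PySem.Chars.splitOnMax.go sep fuel 0 (List.drop sep.length (c :: rest)) [] (cur.reverse :: acc) by
            simp [PySem.Chars.splitOnMax.go, hpre]]
        rw [go_m0 sep fuel _ _ _ hlen, hf]
        simp
      · have hnp : ¬ sep <+: c :: rest := fun hx => hpre (List.isPrefixOf_iff_prefix.2 hx)
        have hstep : PySem.Chars.splitOnMax.go sep (fuel+1) 1 (c :: rest) cur acc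
            = PySem.Chars.splitOnMax.go sep fuel 1 rest (c :: cur) acc := by
          simp [PySem.Chars.splitOnMax.go, hpre]
        rw [hstep, ih rest (c :: cur) acc (by simp at h ⊢; omega)]
        by_cases hr : PySem.Chars.find rest sep < 0
        · have hninf : ¬ sep <:+: c :: rest := by
            intro hinf
            obtain ⟨j, hj⟩ := (PySem.Chars.exists_prefix_drop_iff_isIn sep (c :: rest)).2
              ((PySem.Chars.isIn_iff_infix _ _).2 hinf)
            match j with
            | 0 => exact hnp (by simpa using hj)
            | j+1 =>
              exact (find_neg_iff rest sep).1 hr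
                (List.IsPrefix.isInfix (by simpa using hj) |>.trans (List.drop_suffix _ _).isInfix)
          rw [if_pos hr, if_pos ((find_neg_iff _ _).2 hninf)]
          simp
        · have hnn : 0 ≤ PySem.Chars.find rest sep := by omega
          obtain ⟨hp, hmin⟩ := PySem.Chars.find_spec hnn
          set j := (PySem.Chars.find rest sep).toNat with hjdef
          have hf : PySem.Chars.find (c :: rest) sep = ((j + 1 : Nat) : Int) := by
            apply find_eq_of
            · simpa using hp
            · intro i hi
              match i with
              | 0 => simpa using hnp
              | i+1 => simpa using hmin i (by omega)
          rw [if_neg hr, if_neg (by rw [hf]; omega), hf]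
          simp only [Int.toNat_natCast]
          simp [List.take_succ_cons, List.drop_succ_cons, Nat.add_right_comm]

theorem chars_cell (s : List Char) (h1 : ['r','o','w'] <+: s) (h2 : ['c','o','l'] <:+: s) :
    PySem.Chars.find s ['c','o','l']
        = (((PySem.Chars.find (s.drop 3) ['c','o','l']).toNat + 3 : Nat) : Int)
    ∧ PySem.Chars.splitOnMax (s.drop 3) ['c','o','l'] 1
        = [(s.drop 3).take (PySem.Chars.find (s.drop 3) ['c','o','l']).toNat,
           (s.drop 3).drop ((PySem.Chars.find (s.drop 3) ['c','o','l']).toNat + 3)]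
    ∧ ['r','o','w'] ++ (s.drop 3).take (PySem.Chars.find (s.drop 3) ['c','o','l']).toNat
        ++ ['c','o','l'] ++ (s.drop 3).drop ((PySem.Chars.find (s.drop 3) ['c','o','l']).toNat + 3)
        = s := by
  have h2' : ['c','o','l'] <:+: s.drop 3 := col_in_drop3 s h1 h2
  obtain ⟨tail, rfl⟩ := h1
  have hdrop3 : List.drop 3 (['r','o','w'] ++ tail) = tail := by simp
  rw [hdrop3] at h2' ⊢
  have hnn : 0 ≤ PySem.Chars.find tail ['c','o','l'] :=
    (PySem.Chars.find_nonneg_iff _ _).2 h2'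
  obtain ⟨hp, hmin⟩ := PySem.Chars.find_spec hnn
  set i2 := (PySem.Chars.find tail ['c','o','l']).toNat with hi2
  refine ⟨?_, ?_, ?_⟩
  · apply find_eq_of
    · have : List.drop (i2 + 3) (['r','o','w'] ++ tail) = List.drop i2 tail := by
        simp
      rw [this]; exact hp
    · intro i hi
      match i with
      | 0 => simp [List.cons_prefix_cons]
      | 1 => simp [List.cons_prefix_cons]
      | 2 => simp [List.cons_prefix_cons]
      | (n+3) =>
        have : List.drop (n + 3) (['r','o','w'] ++ tail) = List.drop n tail := by
          simp
        rw [this]; exact hmin n (by omega)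
  · unfold PySem.Chars.splitOnMax
    rw [if_neg (by omega)]
    rw [show (1 : Int).toNat = 1 from rfl]
    rw [go_one ['c','o','l'] (by simp) (tail.length + 1) tail [] [] (by omega)]
    rw [if_neg (by omega)]
    simp [← hi2]
  · obtain ⟨u, hu⟩ := hp
    have htail : tail = tail.take i2 ++ List.drop i2 tail := (List.take_append_drop _ _).symm
    have hu2 : List.drop i2 tail = ['c','o','l'] ++ List.drop (i2 + 3) tail := by
      have hd : List.drop (i2 + 3) tail = List.drop 3 (List.drop i2 tail) := by
        rw [List.drop_drop, Nat.add_comm]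
      rw [hd, ← hu]
      simp
    conv_rhs => rw [htail, hu2]
    simp

theorem update_cons {α : Type} [BEq α] (s : PySem.Set α) (k : α) (l : List α) :
    PySem.Set.update s (k :: l) = PySem.Set.update (PySem.Set.add s k) l := rfl

theorem Ago_eq : ∀ (cells : List String) (order : List (List Char))
    (rows : PySem.Dict (List Char) (List (List Char))),
    (∀ k, rows.contains k = true ↔ k ∈ order) →
    groupA_go cells order rows =
      match keyedB cells with
      | none => []
      | some P =>
          (PySem.Set.update order (P.map Prod.fst)).map
            (fun k => (rows.getD k []).map String.ofList
                      ++ (P.filter (fun p => p.1 == k)).map Prod.snd) := by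
  intro cells
  induction cells with
  | nil =>
    intro order rows hinv
    simp [groupA_go, keyedB, PySem.Set.update]
  | cons cell rest ih =>
    intro order rows hinv
    by_cases hsw : PySem.Chars.startswith cell.toList ['r','o','w'] = true
    · by_cases hin : PySem.Chars.isIn ['c','o','l'] cell.toList = true
      · -- cell is valid
        have h1 : ['r','o','w'] <+: cell.toList := (PySem.Chars.startswith_iff _ _).1 hsw
        have h2 : ['c','o','l'] <:+: cell.toList := (PySem.Chars.isIn_iff_infix _ _).1 hin
        obtain ⟨hfind, hsplit, hjoin⟩ := chars_cell cell.toList h1 h2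
        have hge : ¬ (PySem.Chars.find cell.toList ['c','o','l'] < 0) := by rw [hfind]; omega
        set s2 := cell.toList.drop 3 with hs2
        set i2 := (PySem.Chars.find s2 ['c','o','l']).toNat with hi2
        have hslice3 : PySem.Chars.slice cell.toList (some 3) none = s2 := by
          rw [PySem.Chars.slice_eq_listSlice,
            PySem.List.slice_from cell.toList (a := 3) (by omega)]
          exact hs2.symm
        have hsm : PySem.Chars.splitMax? s2 ['c','o','l'] 1 = some [s2.take i2, s2.drop (i2 + 3)] := by
          unfold PySem.Chars.splitMax?
          rw [if_neg (by simp), hsplit]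
        have hkeyB : PySem.Chars.slice cell.toList (some 3)
            (some (PySem.Chars.find cell.toList ['c','o','l'])) = s2.take i2 := by
          rw [hfind, PySem.Chars.slice_eq_listSlice,
            show ((3 : Int)) = ((3 : Nat) : Int) from rfl,
            PySem.List.slice_natCast cell.toList 3 (i2 + 3)]
          simp [hs2]
        have hjoin' : PySem.Chars.join [] [['r','o','w'], s2.take i2, ['c','o','l'], s2.drop (i2 + 3)]
            = cell.toList := by
          simp only [PySem.Chars.join, List.intercalate, List.intersperse, List.flatten]
          simpa using hjoin
        have hA : groupA_go (cell :: rest) order rows =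
            (let st := if rows.contains (s2.take i2) then (order, rows)
                       else (order ++ [s2.take i2], rows.insert (s2.take i2) []);
             groupA_go rest st.1
               (st.2.modify (s2.take i2) [] (fun l => l ++ [cell.toList]))) := by
          simp only [groupA_go, hsw, hin, Bool.not_true, Bool.or_self, Bool.false_eq_true,
            if_false, hslice3, hsm, hjoin']
        have hB : keyedB (cell :: rest)
            = (keyedB rest).map (fun ks => (s2.take i2, cell) :: ks) := by
          simp only [keyedB, hsw, Bool.not_true, Bool.false_or, decide_eq_false hge,
            Bool.false_eq_true, if_false, hkeyB]
        rw [hA, hB]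
        by_cases hmem : rows.contains (s2.take i2) = true
        · have hkmem : s2.take i2 ∈ order := (hinv _).1 hmem
          simp only [hmem, if_true]
          rw [ih order (rows.modify (s2.take i2) [] (fun l => l ++ [cell.toList]))
            (by intro k
                rw [PySem.Dict.contains_modify]
                constructor
                · intro h
                  rcases Bool.or_eq_true_iff.1 h with h | h
                  · rw [eq_of_beq h]; exact hkmem
                  · exact (hinv k).1 h
                · intro h; exact Bool.or_eq_true_iff.2 (Or.inr ((hinv k).2 h)))]
          cases hk : keyedB rest with
          | none => rfl
          | some P =>
            simp only [Option.map_some]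
            rw [List.map_cons, update_cons,
              show PySem.Set.add order (s2.take i2) = order by
                simp [PySem.Set.add, hkmem]]
            apply List.map_congr_left
            intro k _
            by_cases hkk : k = s2.take i2
            · subst hkk
              rw [PySem.Dict.getD_modify_self]
              simp
            · rw [PySem.Dict.getD_modify_of_ne rows [] _ hkk]
              have hne : ((s2.take i2, cell).1 == k) = false := by
                simp [Ne.symm hkk]
              simp [hne]
        · have hkmem : s2.take i2 ∉ order := fun h => hmem ((hinv _).2 h)
          have hmem' : rows.contains (s2.take i2) = false := by
            simpa using hmem
          simp only [hmem', Bool.false_eq_true, if_false]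
          rw [ih (order ++ [s2.take i2])
            ((rows.insert (s2.take i2) []).modify (s2.take i2) [] (fun l => l ++ [cell.toList]))
            (by intro k
                rw [PySem.Dict.contains_modify, PySem.Dict.contains_insert]
                simp only [List.mem_append, List.mem_singleton, Bool.or_eq_true,
                  Bool.or_self_left]
                constructor
                · rintro (h | h)
                  · exact Or.inr (eq_of_beq h)
                  · exact Or.inl ((hinv k).1 h)
                · rintro (h | h)
                  · exact Or.inr ((hinv k).2 h)
                  · exact Or.inl (beq_iff_eq.2 h))]
          cases hk : keyedB rest with
          | none => rfl
          | some P =>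
            simp only [Option.map_some]
            rw [List.map_cons, update_cons,
              show PySem.Set.add order (s2.take i2) = order ++ [s2.take i2] by
                simp only [PySem.Set.add]
                rw [if_neg (by simp [hkmem])]]
            apply List.map_congr_left
            intro k _
            by_cases hkk : k = s2.take i2
            · subst hkk
              rw [PySem.Dict.getD_modify_self, PySem.Dict.getD_insert]
              rw [PySem.Dict.getD_of_not_contains rows [] hmem']
              simp
            · rw [PySem.Dict.getD_modify_of_ne _ [] _ hkk, PySem.Dict.getD_insert,
                if_neg hkk]
              have hne : ((s2.take i2, cell).1 == k) = false := by
                simp [Ne.symm hkk]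
              simp [hne]
      · have hlt : PySem.Chars.find cell.toList ['c','o','l'] < 0 :=
          (find_neg_iff _ _).2 (fun hinf => hin ((PySem.Chars.isIn_iff_infix _ _).2 hinf))
        simp [groupA_go, keyedB, hsw, hin, hlt]
    · simp [groupA_go, keyedB, hsw]

-- ===== VERDICT (by name: the statement is the Claim_ definition above) =====
theorem group_cells_by_row_token_py_spec : Claim_equal_group_cells_by_row_token_py := by
  intro cells _
  unfold Spec_group_cells_by_row_token_py group_cells_by_row_token_py group_cells_by_row_token_py_alt
  rw [Ago_eq cells [] PySem.Dict.empty (by simp [PySem.Dict.contains_empty])]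
  cases h : keyedB cells with
  | none => rfl
  | some P => simp [PySem.Set.update_nil_left, PySem.List.dedup_eq_ofList, PySem.Dict.getD_empty]
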